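-- pv_equiv track=rewrite | github.com/Lim-JH-Laskaris/BOJAutoPush | 프로그래머스/lv0/120863. 다항식 더하기/다항식 더하기.py | solution
-- ===== SOURCE A (Python) =====
-- def solution(polynomial):
--     polynomial = ' '+polynomial+' '
--     polynomial = polynomial.replace(' x ',' 1x ')[1:-1]
--     poly_list = polynomial.split(' + ')
--     answer = [0,0]
--     while poly_list :
--         if poly_list[-1][-1] =='x':
--             answer[0] += int(poly_list.pop()[:-1])
--         else :
--             answer[1] += int(poly_list.pop())
--     if answer[0] == 0 :
--         if answer[1] == 0 :
--             return ''
--         else :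
--             return str(answer[1])
--     elif answer[0] == 1:
--         if answer[1] == 0 :
--             return 'x'
--         else :
--             return f'x + {answer[1]}'
--     else:
--         if answer[1] == 0 :
--             return str(answer[0])+'x'
--         else :
--             return f'{answer[0]}x + {answer[1]}'
-- ===== SOURCE B (Python) =====
-- def solution(polynomial):
--     coeff = 0
--     const = 0
--     for tok in polynomial.split(' + '):
--         if tok == 'x':
--             coeff += 1
--         elif tok.endswith('x'):
--             coeff += int(tok[:-1])
--         else:
--             const += int(tok)
--     parts = []
--     if coeff != 0:
--         parts.append('x' if coeff == 1 else str(coeff) + 'x')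
--     if const != 0:
--         parts.append(str(const))
--     return ' + '.join(parts)
-- ===== Notes on version B (the rewrite author's own statement) =====
-- stated objective: simpler
-- what changed: B drops A's pad-with-spaces / replace(' x ',' 1x ') / unpad string preprocessing and its destructive pop()-from-the-end while-loop, and instead folds once over the ' + '-split tokens (treating a bare 'x' token explicitly as coefficient 1) and renders the result by joining a parts list instead of a 6-way if/else tree.
-- outside the precondition, e.g. on solution(' x'): A returns 'x', B raises ValueError; on solution(' x '): A raises ValueError, B raises ValueError; on solution(' 1x '): A raises ValueError, B raises ValueError
import Mathlib
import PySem

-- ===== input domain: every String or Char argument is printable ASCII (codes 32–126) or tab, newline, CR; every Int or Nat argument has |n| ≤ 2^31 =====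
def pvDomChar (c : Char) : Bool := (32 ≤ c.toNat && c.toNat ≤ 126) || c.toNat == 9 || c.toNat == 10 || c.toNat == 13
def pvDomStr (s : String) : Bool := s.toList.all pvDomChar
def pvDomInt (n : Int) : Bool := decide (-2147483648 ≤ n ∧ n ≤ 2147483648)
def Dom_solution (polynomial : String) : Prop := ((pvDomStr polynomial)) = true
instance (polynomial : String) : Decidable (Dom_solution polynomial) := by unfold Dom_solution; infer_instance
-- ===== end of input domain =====

-- B replaces A's pad/replace-' x '/unpad preprocessing and destructive pop-loop by one direct
-- fold over the ' + '-split tokens plus a parts-list join for the output (objective: simpler).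

-- ===== PORT A =====
-- the while-loop: poly_list[-1] / pop() on a nonempty list are getLast / dropLast
def solutionLoop (pl : List (List Char)) (a0 a1 : Int) : Option (Int × Int) :=
  if hpl : pl = [] then some (a0, a1)
  else
    let last := pl.getLast hpl
    match PySem.List.pyGet? last (-1) with          -- poly_list[-1][-1]; none = IndexError
    | none => none
    | some c =>
      if c = 'x' then
        match PySem.Int.ofChars? (PySem.List.slice last none (some (-1))) with   -- int(pop()[:-1])
        | none => none                              -- ValueError
        | some v => solutionLoop pl.dropLast (a0 + v) a1
      else
        match PySem.Int.ofChars? last with          -- int(pop())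
        | none => none                              -- ValueError
        | some v => solutionLoop pl.dropLast a0 (a1 + v)
termination_by pl.length
decreasing_by
  all_goals
    have := List.length_pos_of_ne_nil hpl
    simp only [List.length_dropLast]; omega

def solution (polynomial : String) : String :=
  let p0 : List Char := ' ' :: polynomial.toList ++ [' ']            -- ' '+polynomial+' '
  let p1 := PySem.Chars.replace p0 [' ', 'x', ' '] [' ', '1', 'x', ' ']  -- .replace(' x ',' 1x ')
  let p2 := PySem.List.slice p1 (some 1) (some (-1))                 -- [1:-1]
  let polyList := PySem.Chars.splitOn p2 [' ', '+', ' ']             -- .split(' + ')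
  match solutionLoop polyList 0 0 with
  | none => ""                                                       -- Python raises here (outside Pre_)
  | some (c, k) =>
    if c = 0 then
      if k = 0 then "" else String.ofList (PySem.Int.toChars k)
    else if c = 1 then
      if k = 0 then "x"
      else String.ofList ('x' :: ' ' :: '+' :: ' ' :: PySem.Int.toChars k)     -- f'x + {answer[1]}'
    else
      if k = 0 then String.ofList (PySem.Int.toChars c ++ ['x'])
      else String.ofList (PySem.Int.toChars c ++ 'x' :: ' ' :: '+' :: ' ' :: PySem.Int.toChars k)

-- ===== PORT B =====
-- one step of Source B's for-loop over the tokens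
def solutionAltStep (acc : Option (Int × Int)) (t : List Char) : Option (Int × Int) :=
  match acc with
  | none => none                                    -- a ValueError already happened
  | some (c, k) =>
    if t = ['x'] then some (c + 1, k)
    else if PySem.Chars.endswith t ['x'] then
      (PySem.Int.ofChars? (PySem.List.slice t none (some (-1)))).map (fun v => (c + v, k))  -- int(tok[:-1])
    else
      (PySem.Int.ofChars? t).map (fun v => (c, k + v))                                      -- int(tok)

def solution_alt (polynomial : String) : String :=
  match (PySem.Chars.splitOn polynomial.toList [' ', '+', ' ']).foldl solutionAltStep (some (0, 0)) with
  | none => ""                                      -- Python raises here (outside Pre_)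
  | some (c, k) =>
    let parts : List (List Char) :=
      (if c ≠ 0 then [if c = 1 then ['x'] else PySem.Int.toChars c ++ ['x']] else []) ++
      (if k ≠ 0 then [PySem.Int.toChars k] else [])
    String.ofList (PySem.Chars.join [' ', '+', ' '] parts)

-- ===== PRECONDITION & SPEC =====
-- Pre_ admits the inputs on which A returns: every ' + '-separated token is either the bare
-- variable 'x', or parses with int() (after dropping a trailing 'x' for a coefficient token);
-- tokens on which A's space-padding replace(' x ',' 1x ') hack fires anywhere except on the
-- bare token 'x' (i.e. tokens containing ' x ' once space-padded) are excluded: on most of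
-- them A raises ValueError, and on tokens of the shape '  x' (spaces then 'x') A accidentally
-- returns coefficient 1 while B's int() raises ValueError, so B has no value there to match.
-- Tokens containing ' + ' or ending in ' +' are also excluded (int() rejects them all anyway).
def pTok (t : List Char) : Bool :=
  (decide (t = ['x'])) ||
  (!(decide ([' ', 'x', ' '] <:+: (' ' :: t ++ [' ']))) &&
   !(decide ([' ', '+', ' '] <:+: t)) &&
   !(PySem.Chars.endswith t [' ', '+']) &&
   (if PySem.Chars.endswith t ['x'] then (PySem.Int.ofChars? t.dropLast).isSome
    else (PySem.Int.ofChars? t).isSome))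

def Pre_solution (polynomial : String) : Prop :=
  (PySem.Chars.splitOn polynomial.toList [' ', '+', ' ']).all pTok = true

instance (polynomial : String) : Decidable (Pre_solution polynomial) := by
  unfold Pre_solution; infer_instance

def pvWitness_solution : String := "3x + 7 + x"

def Spec_solution (polynomial : String) (out : String) : Prop := out = solution_alt polynomial
instance (polynomial : String) (out : String) : Decidable (Spec_solution polynomial out) := by unfold Spec_solution; infer_instance

-- ===== CLAIM (what is proved, stated in full; the proofs are below) =====
def Claim_equal_solution : Prop := ∀ (polynomial : String), Dom_solution polynomial → Pre_solution polynomial → Spec_solution polynomial (solution polynomial)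

-- ===== LEMMAS AND PROOFS =====

-- fuel-free mirror of PySem.Chars.splitOn.go for sep = " + "
def sgo : List Char → List Char → List (List Char)
  | l, cur =>
    if [' ', '+', ' '].isPrefixOf l then cur.reverse :: sgo (l.drop 3) []
    else match l with
      | [] => [cur.reverse]
      | c :: rest => sgo rest (c :: cur)
termination_by l => l.length
decreasing_by
  · rename_i h
    have : l.length ≥ 3 := by
      have := (List.isPrefixOf_iff_prefix.mp h).length_le; simpa using this
    simp [List.length_drop]; omega
  · simp

-- fuel-free mirror of PySem.Chars.replace.go for old = " x ", new = " 1x "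
def rgo : List Char → List Char → List Char
  | l, acc =>
    if [' ', 'x', ' '].isPrefixOf l then rgo (l.drop 3) ([' ', '1', 'x', ' '].reverse ++ acc)
    else match l with
      | [] => acc.reverse
      | c :: rest => rgo rest (c :: acc)
termination_by l => l.length
decreasing_by
  · rename_i h
    have : l.length ≥ 3 := by
      have := (List.isPrefixOf_iff_prefix.mp h).length_le; simpa using this
    simp [List.length_drop]; omega
  · simp

theorem sgo_pos (l cur : List Char) (h : [' ', '+', ' '].isPrefixOf l = true) :
    sgo l cur = cur.reverse :: sgo (l.drop 3) [] := by
  rw [sgo.eq_def]; dsimp only; rw [if_pos h]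

theorem sgo_nil (cur : List Char) : sgo [] cur = [cur.reverse] := by
  rw [sgo.eq_def]; dsimp only; rw [if_neg (by decide)]

theorem sgo_neg (c : Char) (rest cur : List Char)
    (h : ([' ', '+', ' '].isPrefixOf (c :: rest)) = false) :
    sgo (c :: rest) cur = sgo rest (c :: cur) := by
  rw [sgo.eq_def]; dsimp only; rw [h]; simp

theorem rgo_pos (l acc : List Char) (h : [' ', 'x', ' '].isPrefixOf l = true) :
    rgo l acc = rgo (l.drop 3) ([' ', '1', 'x', ' '].reverse ++ acc) := by
  rw [rgo.eq_def]; dsimp only; rw [if_pos h]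

theorem rgo_nil (acc : List Char) : rgo [] acc = acc.reverse := by
  rw [rgo.eq_def]; dsimp only; rw [if_neg (by decide)]

theorem rgo_neg (c : Char) (rest acc : List Char)
    (h : ([' ', 'x', ' '].isPrefixOf (c :: rest)) = false) :
    rgo (c :: rest) acc = rgo rest (c :: acc) := by
  rw [rgo.eq_def]; dsimp only; rw [h]; simp

theorem sgo_spec (fuel : Nat) (l cur : List Char) (acc : List (List Char))
    (h : l.length ≤ fuel) :
    PySem.Chars.splitOn.go [' ', '+', ' '] fuel l cur acc = acc.reverse ++ sgo l cur := by
  induction fuel generalizing l cur acc with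
  | zero =>
      have hl : l = [] := List.length_eq_zero_iff.mp (Nat.le_zero.mp h)
      subst hl
      rw [sgo_nil]
      simp [PySem.Chars.splitOn.go, List.isPrefixOf]
  | succ n ih =>
      cases l with
      | nil => rw [sgo_nil]; simp [PySem.Chars.splitOn.go]
      | cons c rest =>
          rw [PySem.Chars.splitOn.go]
          by_cases hp : [' ', '+', ' '].isPrefixOf (c :: rest)
          · rw [sgo_pos _ _ hp]
            simp only [hp, if_true]
            rw [ih _ _ _ (by simp at h ⊢; omega)]
            simp
          · rw [sgo_neg _ _ _ (Bool.eq_false_iff.mpr hp)]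
            simp only [hp, Bool.false_eq_true, if_false]
            rw [ih _ _ _ (by simp at h ⊢; omega)]

theorem rgo_spec (fuel : Nat) (l acc : List Char)
    (h : l.length ≤ fuel) :
    PySem.Chars.replace.go [' ', 'x', ' '] [' ', '1', 'x', ' '] fuel l acc = rgo l acc := by
  induction fuel generalizing l acc with
  | zero =>
      have hl : l = [] := List.length_eq_zero_iff.mp (Nat.le_zero.mp h)
      subst hl
      rw [rgo_nil]
      simp [PySem.Chars.replace.go, List.isPrefixOf]
  | succ n ih =>
      cases l with
      | nil => rw [rgo_nil]; simp [PySem.Chars.replace.go]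
      | cons c rest =>
          rw [PySem.Chars.replace.go]
          by_cases hp : [' ', 'x', ' '].isPrefixOf (c :: rest)
          · rw [rgo_pos _ _ hp]
            simp only [hp, if_true]
            rw [ih _ _ (by simp at h ⊢; omega)]
            simp
          · rw [rgo_neg _ _ _ (Bool.eq_false_iff.mpr hp)]
            simp only [hp, Bool.false_eq_true, if_false]
            rw [ih _ _ (by simp at h ⊢; omega)]

theorem prefix_of_drop_append {p X Y : List Char} {i : Nat}
    (hlen : i + p.length ≤ X.length) (h : p <+: (X.drop i ++ Y)) : p <+: X.drop i := by
  rw [List.prefix_iff_eq_take] at h ⊢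
  rw [List.take_append] at h
  have h2 : p.length - (X.drop i).length = 0 := by simp; omega
  rw [h2, List.take_zero, List.append_nil] at h
  exact h

theorem infix_of_prefix_drop {p X : List Char} {i : Nat} (h : p <+: X.drop i) : p <:+: X :=
  h.isInfix.trans (List.drop_suffix i X).isInfix

theorem sgo_skip (t tail cur : List Char)
    (h : ∀ i, i < t.length → ¬ ([' ', '+', ' '] <+: (t.drop i ++ tail))) :
    sgo (t ++ tail) cur = sgo tail (t.reverse ++ cur) := by
  induction t generalizing cur with
  | nil => simp
  | cons c t' ih =>
      rw [List.cons_append, sgo_neg _ _ _ (by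
        rw [Bool.eq_false_iff]
        intro hp
        exact h 0 (by simp) (by simpa using List.isPrefixOf_iff_prefix.mp hp))]
      rw [ih _ (fun i hi hp => h (i + 1) (by simp; omega) (by simpa using hp))]
      simp

theorem rgo_skip (t tail acc : List Char)
    (h : ∀ i, i < t.length → ¬ ([' ', 'x', ' '] <+: (t.drop i ++ tail))) :
    rgo (t ++ tail) acc = rgo tail (t.reverse ++ acc) := by
  induction t generalizing acc with
  | nil => simp
  | cons c t' ih =>
      rw [List.cons_append, rgo_neg _ _ _ (by
        rw [Bool.eq_false_iff]
        intro hp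
        exact h 0 (by simp) (by simpa using List.isPrefixOf_iff_prefix.mp hp))]
      rw [ih _ (fun i hi hp => h (i + 1) (by simp; omega) (by simpa using hp))]
      simp

theorem sgo_ne_nil (l cur : List Char) : sgo l cur ≠ [] := by
  induction l, cur using sgo.induct with
  | case1 l cur h ih => rw [sgo_pos _ _ h]; simp
  | case2 cur h => rw [sgo_nil]; simp
  | case3 cur c rest h ih => rw [sgo_neg _ _ _ (Bool.eq_false_iff.mpr h)]; exact ih

theorem join_sgo (l cur : List Char) :
    PySem.Chars.join [' ', '+', ' '] (sgo l cur) = cur.reverse ++ l := by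
  induction l, cur using sgo.induct with
  | case1 l cur h ih =>
      rw [sgo_pos _ _ h]
      obtain ⟨a, as, ha⟩ := List.exists_cons_of_ne_nil (sgo_ne_nil (l.drop 3) [])
      rw [ha, PySem.Chars.join_cons_cons, ← ha, ih]
      obtain ⟨r, hr⟩ := List.isPrefixOf_iff_prefix.mp h
      rw [← hr]
      simp
  | case2 cur h =>
      rw [sgo_nil, PySem.Chars.join_singleton]
      simp
  | case3 cur c rest h ih =>
      rw [sgo_neg _ _ _ (Bool.eq_false_iff.mpr h), ih]
      simp

def goodTok (u : List Char) : Prop :=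
  ¬ ([' ', '+', ' '] <:+: u) ∧ ¬ ([' ', '+'] <:+ u)

theorem sgo_scan (u Y cur : List Char) (hg : goodTok u)
    (hY : Y = [] ∨ ∃ r, Y = [' ', '+', ' '] ++ r) :
    sgo (u ++ Y) cur = sgo Y (u.reverse ++ cur) := by
  apply sgo_skip
  intro i hi hp
  by_cases hc : i + 3 ≤ u.length
  · exact hg.1 (infix_of_prefix_drop (prefix_of_drop_append (by simpa using hc) hp))
  · obtain ⟨r, hr⟩ := hp
    rcases hY with hY | ⟨w, hY⟩
    · subst hY
      have := congrArg List.length hr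
      simp at this; omega
    · subst hY
      have hlen : (u.drop i).length = u.length - i := by simp
      have hcase : u.length - i = 1 ∨ u.length - i = 2 := by omega
      rcases hcase with h1 | h2
      · obtain ⟨a, ha⟩ := List.length_eq_one_iff.mp (by rw [hlen, h1])
        rw [ha] at hr
        simp at hr
      · obtain ⟨a, b, hab⟩ := List.length_eq_two.mp (by rw [hlen, h2])
        rw [hab] at hr
        simp at hr
        apply hg.2
        have hsuf : [a, b] <:+ u := hab ▸ List.drop_suffix i u
        rw [← hr.1, ← hr.2.1] at hsuf
        exact hsuf

theorem sgo_join (ts : List (List Char)) (hne : ts ≠ []) (h : ∀ u ∈ ts, goodTok u) :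
    sgo (PySem.Chars.join [' ', '+', ' '] ts) [] = ts := by
  induction ts with
  | nil => exact absurd rfl hne
  | cons t ts' ih =>
      cases ts' with
      | nil =>
          rw [PySem.Chars.join_singleton]
          have := sgo_scan t [] [] (h t (by simp)) (Or.inl rfl)
          simp only [List.append_nil] at this
          rw [this, sgo_nil]
          simp
      | cons t2 ts'' =>
          rw [PySem.Chars.join_cons_cons]
          rw [List.append_assoc]
          rw [sgo_scan t _ [] (h t (by simp)) (Or.inr ⟨_, rfl⟩)]
          rw [sgo_pos _ _ (List.isPrefixOf_iff_prefix.mpr ⟨_, rfl⟩)]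
          rw [show ([' ', '+', ' '] ++ PySem.Chars.join [' ', '+', ' '] (t2 :: ts'')).drop 3
                = PySem.Chars.join [' ', '+', ' '] (t2 :: ts'') from by simp]
          rw [ih (by simp) (fun u hu => h u (by simp [hu]))]
          simp

theorem rgo_scan (t w acc : List Char)
    (hinf : ¬ ([' ', 'x', ' '] <:+: (' ' :: t ++ [' ']))) :
    rgo ((' ' :: t) ++ (' ' :: w)) acc = rgo (' ' :: w) ((' ' :: t).reverse ++ acc) := by
  apply rgo_skip
  intro i hi hp
  have hile : i ≤ t.length := by simp at hi; omega
  have hz : (' ' :: t).drop i ++ (' ' :: w) = (' ' :: t ++ [' ']).drop i ++ w := by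
    rw [show (' ' :: t ++ [' ']) = (' ' :: t) ++ [' '] from by simp]
    rw [List.drop_append]
    have h0 : i - (t.length + 1) = 0 := by omega
    simp [h0]
  rw [hz] at hp
  by_cases hc : i + 3 ≤ (' ' :: t ++ [' ']).length
  · exact hinf (infix_of_prefix_drop (prefix_of_drop_append (by simpa using hc) hp))
  · have hc' : t.length ≤ i := by simp at hc; omega
    have hlen2 : ((' ' :: t ++ [' ']).drop i).length = 2 := by
      simp; omega
    obtain ⟨a, b, hab⟩ := List.length_eq_two.mp hlen2
    have hsuf : [a, b] <:+ (' ' :: t ++ [' ']) := hab ▸ List.drop_suffix i _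
    obtain ⟨pre, hpre⟩ := hsuf
    have hb : b = ' ' := by
      have h1 := congrArg List.getLast? hpre
      rw [show (' ' :: t ++ [' ']) = (' ' :: t) ++ [' '] from by simp,
          List.getLast?_concat] at h1
      rw [show pre ++ [a, b] = (pre ++ [a]) ++ [b] from by simp,
          List.getLast?_concat] at h1
      exact Option.some.inj h1
    obtain ⟨r, hr⟩ := hp
    rw [hab, hb] at hr
    simp at hr

def fixT (t : List Char) : List Char := if t = ['x'] then ['1', 'x'] else t

theorem pTok_not_x (t : List Char) (h : pTok t = true) (hx : ¬ t = ['x']) :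
    ¬ ([' ', 'x', ' '] <:+: (' ' :: t ++ [' '])) ∧ goodTok t ∧
    (if PySem.Chars.endswith t ['x'] then (PySem.Int.ofChars? t.dropLast).isSome = true
     else (PySem.Int.ofChars? t).isSome = true) := by
  unfold pTok at h
  simp only [hx, decide_false, Bool.false_or, Bool.and_eq_true, Bool.not_eq_true',
    decide_eq_false_iff_not] at h
  obtain ⟨⟨⟨h1, h2⟩, h3⟩, h4⟩ := h
  refine ⟨h1, ⟨h2, ?_⟩, ?_⟩
  · intro hsuf
    rw [show (PySem.Chars.endswith t [' ', '+']) = true from (PySem.Chars.endswith_iff _ _).mpr hsuf] at h3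
    exact absurd h3 (by simp)
  · split <;> rename_i hend <;> simp [hend] at h4 <;> exact h4

theorem rgo_join (ts : List (List Char)) (hne : ts ≠ []) (h : ∀ t ∈ ts, pTok t = true) (acc : List Char) :
    rgo (' ' :: PySem.Chars.join [' ', '+', ' '] ts ++ [' ']) acc
      = acc.reverse ++ ' ' :: PySem.Chars.join [' ', '+', ' '] (ts.map fixT) ++ [' '] := by
  induction ts generalizing acc with
  | nil => exact absurd rfl hne
  | cons t ts' ih =>
      by_cases hx : t = ['x']
      · subst hx
        cases ts' with
        | nil =>
            rw [PySem.Chars.join_singleton]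
            rw [rgo_pos _ _ (by decide)]
            rw [show ((' ' :: ['x'] ++ [' ']).drop 3) = ([] : List Char) from by decide]
            rw [rgo_nil]
            simp [fixT, PySem.Chars.join_singleton]
        | cons t2 ts'' =>
            rw [PySem.Chars.join_cons_cons]
            rw [rgo_pos _ _ (by simp [List.isPrefixOf])]
            rw [show ((' ' :: (['x'] ++ [' ', '+', ' '] ++ PySem.Chars.join [' ', '+', ' '] (t2 :: ts'')) ++ [' ']).drop 3)
                  = '+' :: (' ' :: PySem.Chars.join [' ', '+', ' '] (t2 :: ts'') ++ [' ']) from by simp]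
            rw [rgo_neg _ _ _ (by simp [List.isPrefixOf])]
            rw [ih (by simp) (fun u hu => h u (by simp [hu]))]
            simp [fixT, PySem.Chars.join_cons_cons]
      · obtain ⟨hinf, hgood, hparse⟩ := pTok_not_x t (h t (by simp)) hx
        have hfix : fixT t = t := if_neg hx
        cases ts' with
        | nil =>
            rw [PySem.Chars.join_singleton]
            have hscan := rgo_scan t [] acc hinf
            rw [show (' ' :: t) ++ (' ' :: ([] : List Char)) = ' ' :: t ++ [' '] from by simp] at hscan
            rw [hscan]
            rw [rgo_neg _ _ _ (by decide)]
            rw [rgo_nil]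
            simp [hfix, PySem.Chars.join_singleton]
        | cons t2 ts'' =>
            rw [PySem.Chars.join_cons_cons]
            rw [show ' ' :: (t ++ [' ', '+', ' '] ++ PySem.Chars.join [' ', '+', ' '] (t2 :: ts'')) ++ [' ']
                  = (' ' :: t) ++ (' ' :: ('+' :: (' ' :: PySem.Chars.join [' ', '+', ' '] (t2 :: ts'') ++ [' ']))) from by simp]
            rw [rgo_scan t _ acc hinf]
            rw [rgo_neg _ _ _ (by simp [List.isPrefixOf])]
            rw [rgo_neg _ _ _ (by simp [List.isPrefixOf])]
            rw [ih (by simp) (fun u hu => h u (by simp [hu]))]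
            simp [hfix, PySem.Chars.join_cons_cons]

theorem slice_one_neg_one (a b : Char) (mid : List Char) :
    PySem.List.slice (a :: mid ++ [b]) (some 1) (some (-1)) = mid := by
  simp [PySem.List.slice, PySem.List.clampIdx]
  rw [if_neg (by omega)]
  rw [Nat.add_sub_cancel]
  exact List.take_left' rfl

-- per-token contribution in B's reading
def tvB (t : List Char) : Option (Int × Int) :=
  if t = ['x'] then some (1, 0)
  else if PySem.Chars.endswith t ['x'] then (PySem.Int.ofChars? t.dropLast).map (fun v => (v, 0))
  else (PySem.Int.ofChars? t).map (fun v => (0, v))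

-- per-token contribution in A's reading of an (already replace-fixed) token
def tvA (t : List Char) : Option (Int × Int) :=
  match PySem.List.pyGet? t (-1) with
  | none => none
  | some c =>
    if c = 'x' then (PySem.Int.ofChars? (PySem.List.slice t none (some (-1)))).map (fun v => (v, 0))
    else (PySem.Int.ofChars? t).map (fun v => (0, v))

def S1 (f : List Char → Option (Int × Int)) (ts : List (List Char)) : Int :=
  (ts.map (fun t => ((f t).getD (0, 0)).1)).sum
def S2 (f : List Char → Option (Int × Int)) (ts : List (List Char)) : Int :=
  (ts.map (fun t => ((f t).getD (0, 0)).2)).sum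

theorem stepB_eq (c k : Int) (t : List Char) :
    solutionAltStep (some (c, k)) t = (tvB t).map (fun p => (c + p.1, k + p.2)) := by
  unfold solutionAltStep tvB
  rw [PySem.List.slice_to_neg_one]
  split_ifs with h1 h2
  · simp
  · cases PySem.Int.ofChars? t.dropLast <;> simp
  · cases PySem.Int.ofChars? t <;> simp

theorem foldB (ts : List (List Char)) (c k : Int) (h : ∀ t ∈ ts, (tvB t).isSome = true) :
    ts.foldl solutionAltStep (some (c, k)) = some (c + S1 tvB ts, k + S2 tvB ts) := by
  induction ts generalizing c k with
  | nil => simp [S1, S2]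
  | cons t ts' ih =>
      obtain ⟨⟨p1, p2⟩, hp⟩ := Option.isSome_iff_exists.mp (h t (by simp))
      rw [List.foldl_cons, stepB_eq, hp]
      simp only [Option.map_some]
      rw [ih _ _ (fun u hu => h u (by simp [hu]))]
      simp [S1, S2, hp]
      constructor <;> ring

theorem loopA (pl : List (List Char)) (a0 a1 : Int) (h : ∀ t ∈ pl, (tvA t).isSome = true) :
    solutionLoop pl a0 a1 = some (a0 + S1 tvA pl, a1 + S2 tvA pl) := by
  induction pl using List.reverseRecOn generalizing a0 a1 with
  | nil => rw [solutionLoop]; simp [S1, S2]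
  | append_singleton ys y ih =>
      obtain ⟨⟨p1, p2⟩, hp⟩ := Option.isSome_iff_exists.mp (h y (by simp))
      rw [solutionLoop]
      have hne : ¬ (ys ++ [y] = []) := by simp
      rw [dif_neg hne]
      simp only [List.getLast_concat, List.dropLast_concat]
      unfold tvA at hp
      cases hg : PySem.List.pyGet? y (-1) with
      | none => rw [hg] at hp; simp at hp
      | some ch =>
          rw [hg] at hp
          dsimp only at hp
          dsimp only
          by_cases hch : ch = 'x'
          · rw [if_pos hch] at hp
            cases ho : PySem.Int.ofChars? (PySem.List.slice y none (some (-1))) with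
            | none => rw [ho] at hp; simp at hp
            | some v =>
                rw [ho] at hp
                simp only [Option.map_some, Option.some.injEq, Prod.mk.injEq] at hp
                obtain ⟨hv, hz⟩ := hp
                rw [if_pos hch]
                dsimp only
                rw [ih _ _ (fun u hu => h u (by simp [hu]))]
                have hS1 : S1 tvA (ys ++ [y]) = S1 tvA ys + p1 := by
                  simp [S1, tvA, hg, hch, ho, hv]
                have hS2 : S2 tvA (ys ++ [y]) = S2 tvA ys + p2 := by
                  simp [S2, tvA, hg, hch, ho, ← hz]
                rw [hS1, hS2]
                simp only [Option.some.injEq, Prod.mk.injEq]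
                constructor <;> omega
          · rw [if_neg hch] at hp
            cases ho : PySem.Int.ofChars? y with
            | none => rw [ho] at hp; simp at hp
            | some v =>
                rw [ho] at hp
                simp only [Option.map_some, Option.some.injEq, Prod.mk.injEq] at hp
                obtain ⟨hz, hv⟩ := hp
                rw [if_neg hch]
                dsimp only
                rw [ih _ _ (fun u hu => h u (by simp [hu]))]
                have hS1 : S1 tvA (ys ++ [y]) = S1 tvA ys + p1 := by
                  simp [S1, tvA, hg, hch, ho, ← hz]
                have hS2 : S2 tvA (ys ++ [y]) = S2 tvA ys + p2 := by
                  simp [S2, tvA, hg, hch, ho, hv]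
                rw [hS1, hS2]
                simp only [Option.some.injEq, Prod.mk.injEq]
                constructor <;> omega

theorem ofChars_nil : PySem.Int.ofChars? ([] : List Char) = none := by decide

theorem tvA_fixT (t : List Char) (h : pTok t = true) : tvA (fixT t) = tvB t := by
  by_cases hx : t = ['x']
  · subst hx
    decide
  · obtain ⟨-, -, hparse⟩ := pTok_not_x t h hx
    have hfix : fixT t = t := if_neg hx
    rw [hfix]
    by_cases hend : PySem.Chars.endswith t ['x'] = true
    · obtain ⟨t', ht'⟩ := (PySem.Chars.endswith_iff t ['x']).mp hend
      have hg : PySem.List.pyGet? t (-1) = some 'x' := by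
        rw [← ht']; exact PySem.List.pyGet?_neg_one_append_singleton t' 'x'
      unfold tvA tvB
      rw [hg]
      dsimp only
      rw [if_pos rfl, if_neg hx, if_pos hend, PySem.List.slice_to_neg_one]
    · rw [if_neg hend] at hparse
      have htne : t ≠ [] := by
        intro he; rw [he, ofChars_nil] at hparse; simp at hparse
      rcases List.eq_nil_or_concat t with h1 | ⟨t', y, hty⟩
      · exact absurd h1 htne
      · rw [List.concat_eq_append] at hty
        have hy : ¬ (y = 'x') := by
          intro he
          exact hend ((PySem.Chars.endswith_iff t ['x']).mpr ⟨t', by rw [hty, he]⟩)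
        have hg : PySem.List.pyGet? t (-1) = some y := by
          rw [hty]; exact PySem.List.pyGet?_neg_one_append_singleton t' y
        unfold tvA tvB
        rw [hg]
        dsimp only
        rw [if_neg hy, if_neg hx, if_neg hend]

theorem tvB_isSome (t : List Char) (h : pTok t = true) : (tvB t).isSome = true := by
  by_cases hx : t = ['x']
  · subst hx; decide
  · obtain ⟨-, -, hparse⟩ := pTok_not_x t h hx
    unfold tvB
    rw [if_neg hx]
    split <;> rename_i hend <;> simp [hend] at hparse ⊢ <;> simp [hparse]

theorem S1_fixT (ts : List (List Char)) (h : ∀ t ∈ ts, pTok t = true) :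
    S1 tvA (ts.map fixT) = S1 tvB ts := by
  unfold S1
  rw [List.map_map]
  congr 1
  exact List.map_congr_left (fun t ht => by simp [tvA_fixT t (h t ht)])

theorem S2_fixT (ts : List (List Char)) (h : ∀ t ∈ ts, pTok t = true) :
    S2 tvA (ts.map fixT) = S2 tvB ts := by
  unfold S2
  rw [List.map_map]
  congr 1
  exact List.map_congr_left (fun t ht => by simp [tvA_fixT t (h t ht)])

theorem goodTok_fixT (t : List Char) (h : pTok t = true) : goodTok (fixT t) := by
  by_cases hx : t = ['x']
  · subst hx
    unfold fixT goodTok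
    constructor
    · simp
      decide
    · simp
      decide
  · rw [show fixT t = t from if_neg hx]
    exact (pTok_not_x t h hx).2.1

theorem format_eq (c k : Int) :
    (if c = 0 then
      if k = 0 then "" else String.ofList (PySem.Int.toChars k)
    else if c = 1 then
      if k = 0 then "x"
      else String.ofList ('x' :: ' ' :: '+' :: ' ' :: PySem.Int.toChars k)
    else
      if k = 0 then String.ofList (PySem.Int.toChars c ++ ['x'])
      else String.ofList (PySem.Int.toChars c ++ 'x' :: ' ' :: '+' :: ' ' :: PySem.Int.toChars k))
    = String.ofList (PySem.Chars.join [' ', '+', ' ']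
        ((if c ≠ 0 then [if c = 1 then ['x'] else PySem.Int.toChars c ++ ['x']] else []) ++
         (if k ≠ 0 then [PySem.Int.toChars k] else []))) := by
  by_cases hc : c = 0
  · subst hc
    by_cases hk : k = 0
    · subst hk
      simp [PySem.Chars.join_nil]
    · simp [hk, PySem.Chars.join_singleton]
  · by_cases hc1 : c = 1
    · subst hc1
      by_cases hk : k = 0
      · subst hk
        simp [PySem.Chars.join_singleton]
      · simp only [hc, hk, ne_eq, not_false_iff, ite_true, ite_false]
        simp [PySem.Chars.join_cons_cons, PySem.Chars.join_singleton]
    · by_cases hk : k = 0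
      · subst hk
        simp [hc, hc1, PySem.Chars.join_singleton]
      · simp only [hc, hc1, hk, ne_eq, not_false_iff, ite_true, ite_false]
        simp [PySem.Chars.join_cons_cons, PySem.Chars.join_singleton]

-- ===== VERDICT (by name: the statement is the Claim_ definition above) =====
theorem solution_spec : Claim_equal_solution := by
  intro polynomial _hdom hpre
  unfold Spec_solution solution solution_alt
  have hsplit : ∀ (l : List Char), PySem.Chars.splitOn l [' ', '+', ' '] = sgo l [] := by
    intro l
    unfold PySem.Chars.splitOn
    rw [sgo_spec _ _ _ _ (by omega)]
    simp
  set toks := PySem.Chars.splitOn polynomial.toList [' ', '+', ' '] with htoks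
  have hall : ∀ t ∈ toks, pTok t = true := by
    intro t ht
    exact List.all_eq_true.mp hpre t ht
  have htoksne : toks ≠ [] := by
    rw [htoks, hsplit]; exact sgo_ne_nil _ _
  have hjoin : PySem.Chars.join [' ', '+', ' '] toks = polynomial.toList := by
    rw [htoks, hsplit, join_sgo]; simp
  have hrep : PySem.Chars.replace (' ' :: polynomial.toList ++ [' ']) [' ', 'x', ' '] [' ', '1', 'x', ' ']
      = ' ' :: PySem.Chars.join [' ', '+', ' '] (toks.map fixT) ++ [' '] := by
    unfold PySem.Chars.replace
    rw [if_neg (by simp)]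
    rw [rgo_spec _ _ _ (le_refl _)]
    rw [← hjoin]
    rw [rgo_join toks htoksne hall []]
    simp
  dsimp only
  rw [hrep]
  rw [slice_one_neg_one]
  rw [hsplit]
  rw [sgo_join (toks.map fixT) (by simp [htoksne]) (by
    intro u hu
    obtain ⟨t, ht, rfl⟩ := List.mem_map.mp hu
    exact goodTok_fixT t (hall t ht))]
  rw [loopA _ 0 0 (by
    intro u hu
    obtain ⟨t, ht, rfl⟩ := List.mem_map.mp hu
    rw [tvA_fixT t (hall t ht)]
    exact tvB_isSome t (hall t ht))]
  rw [foldB toks 0 0 (fun t ht => tvB_isSome t (hall t ht))]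
  rw [S1_fixT toks hall, S2_fixT toks hall]
  simp only [zero_add]
  exact format_eq (S1 tvB toks) (S2 tvB toks)
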